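-- pv_equiv track=rewrite | github.com/ChadRM/torrentcleanup | main.py | get_next_key
-- ===== SOURCE A (Python) =====
-- def get_next_key(dictionary, current_key):
--     keys_iterator = iter(dictionary)
--     found_current = False
--     for key in keys_iterator:
--         if found_current:
--             return key  # This is the next key
--         if key == current_key:
--             found_current = True
--     return None
-- ===== SOURCE B (Python) =====
-- def get_next_key(dictionary, current_key):
--     keys = list(dictionary)
--     if current_key not in keys:
--         return None
--     i = keys.index(current_key)
--     return keys[i + 1] if i + 1 < len(keys) else None
-- ===== Notes on version B (the rewrite author's own statement) =====
-- stated objective: simpler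
-- what changed: Replaces the stateful flag loop with materializing the key list once and doing a membership test plus positional index lookup (keys.index / bounds-checked keys[i+1]).
import Mathlib
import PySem

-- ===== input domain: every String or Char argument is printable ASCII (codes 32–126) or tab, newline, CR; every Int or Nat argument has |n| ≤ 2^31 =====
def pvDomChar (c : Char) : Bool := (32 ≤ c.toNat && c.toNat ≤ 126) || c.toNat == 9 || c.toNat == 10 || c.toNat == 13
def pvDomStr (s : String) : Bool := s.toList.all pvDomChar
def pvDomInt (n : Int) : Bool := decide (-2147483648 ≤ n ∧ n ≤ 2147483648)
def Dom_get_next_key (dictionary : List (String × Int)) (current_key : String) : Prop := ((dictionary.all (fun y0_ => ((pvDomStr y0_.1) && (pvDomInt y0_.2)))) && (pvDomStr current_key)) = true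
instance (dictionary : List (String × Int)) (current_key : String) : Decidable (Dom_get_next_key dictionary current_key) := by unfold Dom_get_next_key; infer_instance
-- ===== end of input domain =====

-- B: materialize the key list once, then membership test + positional index lookup (simpler decomposition; same O(n) cost).
-- ===== PORT A =====
-- the for-loop over the dict's keys carrying the found_current flag
def pvLoopA (keys : List String) (current_key : String) (found_current : Bool) : Option String :=
  match keys with
  | [] => none
  | key :: rest =>
    if found_current then some key
    else if key == current_key then pvLoopA rest current_key true
    else pvLoopA rest current_key found_current

def get_next_key (dictionary : List (String × Int)) (current_key : String) : Option String :=
  pvLoopA (dictionary.map Prod.fst) current_key false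

-- ===== PORT B =====
def get_next_key_alt (dictionary : List (String × Int)) (current_key : String) : Option String :=
  let keys := dictionary.map Prod.fst
  if current_key ∈ keys then
    match PySem.List.index? keys current_key with
    | none => none
    | some i => if i + 1 < keys.length then keys[i + 1]? else none
  else none

-- ===== PRECONDITION & SPEC =====
def Spec_get_next_key (dictionary : List (String × Int)) (current_key : String) (out : Option String) : Prop := out = get_next_key_alt dictionary current_key
instance (dictionary : List (String × Int)) (current_key : String) (out : Option String) : Decidable (Spec_get_next_key dictionary current_key out) := by unfold Spec_get_next_key; infer_instance

-- ===== CLAIM (what is proved, stated in full; the proofs are below) =====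
def Claim_equal_get_next_key : Prop := ∀ (dictionary : List (String × Int)) (current_key : String), Dom_get_next_key dictionary current_key → Spec_get_next_key dictionary current_key (get_next_key dictionary current_key)

-- ===== LEMMAS AND PROOFS =====

-- ===== VERDICT (by name: the statement is the Claim_ definition above) =====
-- the two sides agree for every key list, by induction following pvLoopA
theorem pvLoop_eq (keys : List String) (ck : String) :
    pvLoopA keys ck false =
      (if ck ∈ keys then
        match PySem.List.index? keys ck with
        | none => none
        | some i => if i + 1 < keys.length then keys[i + 1]? else none
      else none) := by
  induction keys with
  | nil => simp [pvLoopA]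
  | cons k rest ih =>
    by_cases hk : k = ck
    · subst hk
      rw [PySem.List.index?_cons_self, if_pos (List.mem_cons_self ..)]
      cases rest with
      | nil => simp [pvLoopA]
      | cons r rs => simp [pvLoopA]
    · rw [PySem.List.index?_cons_of_ne rest hk]
      have h1 : pvLoopA (k :: rest) ck false = pvLoopA rest ck false := by
        simp [pvLoopA, hk]
      rw [h1, ih]
      by_cases hm : ck ∈ rest
      · rw [if_pos hm, if_pos (List.mem_cons_of_mem k hm)]
        cases hidx : PySem.List.index? rest ck with
        | none =>
          exact absurd ((PySem.List.index?_eq_none_iff rest ck).1 hidx) (by simpa using hm)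
        | some i =>
          simp only [Option.map_some]
          by_cases hlt : i + 1 < rest.length
          · rw [if_pos hlt, if_pos (by simp; omega), List.getElem?_cons_succ]
          · rw [if_neg hlt, if_neg (by simp; omega)]
      · rw [if_neg hm, if_neg (by simp [List.mem_cons, hm]; exact fun h => hk h.symm)]

theorem get_next_key_spec : Claim_equal_get_next_key := by
  intro d ck _
  unfold Spec_get_next_key get_next_key get_next_key_alt
  exact pvLoop_eq (d.map Prod.fst) ck
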